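-- pv_equiv track=rewrite | github.com/mmisak/counTR | counTR.py | compute_repeat_unit_offset
-- ===== SOURCE A (Python) =====
-- def compute_repeat_unit_offset(repeat_unit, alignment_optimal_repeat):
--         """Finds repeat unit offset in repsect to repeat unit in the provided format"""
--         optimal_repeat_no_gaps = alignment_optimal_repeat.replace("-","")
--         repeat_unit_offset = 0
--         offset_shifted_repeat_unit = repeat_unit
--         for i in range(len(repeat_unit)):
--                 if offset_shifted_repeat_unit == optimal_repeat_no_gaps[0:len(repeat_unit)]:
--                         break
--                 else:
--                         offset_shifted_repeat_unit = offset_shifted_repeat_unit[1:] + offset_shifted_repeat_unit[0]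
--                         repeat_unit_offset += 1
--         return(repeat_unit_offset)
-- ===== SOURCE B (Python) =====
-- def compute_repeat_unit_offset(repeat_unit, alignment_optimal_repeat):
--     """O(n) re-implementation: the k-th left rotation of repeat_unit is the
--     length-n substring of repeat_unit+repeat_unit starting at k, so the first
--     matching rotation offset is the first occurrence of the target prefix in
--     the doubled string (n if there is none)."""
--     n = len(repeat_unit)
--     target = alignment_optimal_repeat.replace("-", "")[:n]
--     if len(target) < n:
--         return n
--     i = (repeat_unit + repeat_unit).find(target)
--     return i if 0 <= i < n else n
-- ===== Notes on version B (the rewrite author's own statement) =====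
-- stated objective: faster
-- what changed: A's O(n^2) loop that rotates the repeat unit one character at a time and compares each rotation against the target prefix is replaced by a single str.find of the target prefix in the doubled repeat unit (the k-th rotation is the length-n substring of repeat_unit+repeat_unit at position k), mapping a miss or an out-of-range hit to n.
import Mathlib
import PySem

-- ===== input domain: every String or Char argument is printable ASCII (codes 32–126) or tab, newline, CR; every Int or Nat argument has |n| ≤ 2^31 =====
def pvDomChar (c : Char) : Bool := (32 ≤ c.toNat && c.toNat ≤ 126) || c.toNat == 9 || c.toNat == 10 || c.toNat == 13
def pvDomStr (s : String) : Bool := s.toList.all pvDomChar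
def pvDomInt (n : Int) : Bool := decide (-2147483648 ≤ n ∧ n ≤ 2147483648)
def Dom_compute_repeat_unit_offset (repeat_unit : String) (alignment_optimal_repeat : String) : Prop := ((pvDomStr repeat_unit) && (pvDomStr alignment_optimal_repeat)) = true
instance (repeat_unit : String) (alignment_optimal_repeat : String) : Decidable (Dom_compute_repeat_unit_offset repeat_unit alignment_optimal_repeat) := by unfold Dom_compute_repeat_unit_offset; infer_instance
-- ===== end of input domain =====

-- B replaces A's quadratic rotate-and-compare loop by a single substring search of the
-- target prefix in the doubled repeat unit (objective: faster).

-- ===== PORT A =====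
-- shifted[1:] + shifted[0]; shifted[0] is ported as shifted.take 1, exact whenever shifted
-- is nonempty — which holds each time the Python body runs (the loop runs len(shifted) times).
def pvRotA (sh : List Char) : List Char :=
  PySem.List.slice sh (some 1) none ++ sh.take 1

-- the 'for i in range(len(repeat_unit))' loop: fuel = remaining iterations, off = repeat_unit_offset
def pvLoopA (t : List Char) (n : Nat) : Nat → List Char → Int → Int
  | 0, _, off => off
  | f + 1, sh, off =>
      if sh = PySem.List.slice t (some 0) (some (n : Int)) then off
      else pvLoopA t n f (pvRotA sh) (off + 1)

def compute_repeat_unit_offset (repeat_unit : String) (alignment_optimal_repeat : String) : Int :=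
  let optimal_repeat_no_gaps := (PySem.Str.replace alignment_optimal_repeat "-" "").toList
  let s := repeat_unit.toList
  pvLoopA optimal_repeat_no_gaps s.length s.length s 0

-- ===== PORT B =====
def compute_repeat_unit_offset_alt (repeat_unit : String) (alignment_optimal_repeat : String) : Int :=
  let s := repeat_unit.toList
  let n := s.length
  let target := PySem.List.slice (PySem.Str.replace alignment_optimal_repeat "-" "").toList none (some (n : Int))
  if target.length < n then (n : Int)
  else
    let i := PySem.Chars.find (s ++ s) target
    if 0 ≤ i ∧ i < (n : Int) then i else (n : Int)

-- ===== PRECONDITION & SPEC =====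
def Spec_compute_repeat_unit_offset (repeat_unit : String) (alignment_optimal_repeat : String) (out : Int) : Prop := out = compute_repeat_unit_offset_alt repeat_unit alignment_optimal_repeat
instance (repeat_unit : String) (alignment_optimal_repeat : String) (out : Int) : Decidable (Spec_compute_repeat_unit_offset repeat_unit alignment_optimal_repeat out) := by unfold Spec_compute_repeat_unit_offset; infer_instance

-- ===== CLAIM (what is proved, stated in full; the proofs are below) =====
def Claim_equal_compute_repeat_unit_offset : Prop := ∀ (repeat_unit : String) (alignment_optimal_repeat : String), Dom_compute_repeat_unit_offset repeat_unit alignment_optimal_repeat → Spec_compute_repeat_unit_offset repeat_unit alignment_optimal_repeat (compute_repeat_unit_offset repeat_unit alignment_optimal_repeat)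

-- ===== LEMMAS AND PROOFS =====

-- first index ≥ k (scanning f steps) satisfying p; k + f if none
def pvScanIdx (p : Nat → Bool) : Nat → Nat → Nat
  | 0, k => k
  | f + 1, k => if p k then k else pvScanIdx p f (k + 1)

lemma pvScanIdx_eq_of (p : Nat → Bool) (f k r : Nat)
    (hkr : k ≤ r) (hrf : r ≤ k + f)
    (hp : r < k + f → p r = true)
    (hmin : ∀ j, k ≤ j → j < r → p j = false) :
    pvScanIdx p f k = r := by
  induction f generalizing k with
  | zero => simp [pvScanIdx]; omega
  | succ f ih =>
    by_cases hpk : p k = true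
    · have : r = k := by
        by_contra h
        have hk : k < r := by omega
        have := hmin k le_rfl hk
        simp [this] at hpk
      simp [pvScanIdx, hpk, this]
    · have hkr' : k + 1 ≤ r := by
        rcases Nat.lt_or_ge k r with h | h
        · omega
        · have : r = k := by omega
          subst this
          have := hp (by omega)
          exact absurd this hpk
      simp only [pvScanIdx, hpk]
      exact ih (k + 1) hkr' (by omega) (by intro h; exact hp (by omega))
        (fun j hj hjr => hmin j (by omega) hjr)

lemma pvRotA_eq_rotate (sh : List Char) : pvRotA sh = sh.rotate 1 := by
  cases sh with
  | nil => simp [pvRotA, PySem.List.slice_from_one]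
  | cons c rest =>
      simp [pvRotA, PySem.List.slice_from_one, List.rotate_cons_succ]

lemma pvLoopA_eq_scan (t : List Char) (n : Nat) (s : List Char)
    (f k : Nat) (off : Int) :
    pvLoopA t n f (s.rotate k) off
      = off + ((pvScanIdx (fun j => decide (s.rotate j = PySem.List.slice t (some 0) (some (n : Int)))) f k : Int) - k) := by
  induction f generalizing k off with
  | zero => simp [pvLoopA, pvScanIdx]
  | succ f ih =>
    by_cases h : s.rotate k = PySem.List.slice t (some 0) (some (n : Int))
    · simp [pvLoopA, pvScanIdx, h]
    · have hrot : pvRotA (s.rotate k) = s.rotate (k + 1) := by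
        rw [pvRotA_eq_rotate, List.rotate_rotate]
      simp only [pvLoopA, pvScanIdx, h, if_false, decide_eq_true_eq, hrot]
      rw [ih (k + 1) (off + 1)]
      push_cast
      ring

-- rotations seen through the doubled list: for j ≤ n, target (of length n) is a prefix of
-- (s ++ s).drop j iff it equals the j-th rotation of s
lemma pvOcc_iff (s tgt : List Char) (j : Nat) (hj : j ≤ s.length)
    (hlen : tgt.length = s.length) :
    tgt <+: (s ++ s).drop j ↔ s.rotate j = tgt := by
  have hdrop : (s ++ s).drop j = s.drop j ++ s := List.drop_append_of_le_length hj
  have htake : (s.drop j ++ s).take s.length = s.drop j ++ s.take j := by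
    have h1 : (s.drop j).length = s.length - j := by simp
    have hlen' : s.length = (s.drop j).length + j := by omega
    rw [hlen', List.take_append]
    have h2 : (List.drop j s).length + j - (List.drop j s).length = j := by omega
    rw [h2, List.take_of_length_le (by omega)]
  constructor
  · intro hpre
    rw [List.prefix_iff_eq_take] at hpre
    rw [List.rotate_eq_drop_append_take hj]
    rw [hdrop, hlen, htake] at hpre
    exact hpre.symm
  · intro hrot
    rw [List.prefix_iff_eq_take, hdrop, hlen, htake, ← hrot,
      List.rotate_eq_drop_append_take hj]

-- the whole equivalence, over lists of characters
lemma pvMain (s t : List Char) :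
    pvLoopA t s.length s.length s 0 =
      if (PySem.List.slice t none (some (s.length : Int))).length < s.length
      then (s.length : Int)
      else if 0 ≤ PySem.Chars.find (s ++ s) (PySem.List.slice t none (some (s.length : Int)))
             ∧ PySem.Chars.find (s ++ s) (PySem.List.slice t none (some (s.length : Int))) < (s.length : Int)
           then PySem.Chars.find (s ++ s) (PySem.List.slice t none (some (s.length : Int)))
           else (s.length : Int) := by
  set n := s.length with hn
  have htgt : PySem.List.slice t none (some (n : Int)) = t.take n := PySem.List.slice_to_natCast t n
  rw [htgt]
  set p := fun j => decide (s.rotate j = PySem.List.slice t (some 0) (some (n : Int))) with hp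
  have hpj : ∀ j, p j = true ↔ s.rotate j = t.take n := by
    intro j; simp [hp]
  have hA : pvLoopA t n n s 0 = ((pvScanIdx p n 0 : Int)) := by
    have := pvLoopA_eq_scan t n s n 0 0
    simpa [hp] using this
  rw [hA]
  by_cases hshort : (t.take n).length < n
  · -- target shorter than n: no rotation can match, A's loop exhausts
    rw [if_pos hshort]
    have hscan : pvScanIdx p n 0 = n := by
      apply pvScanIdx_eq_of p n 0 n (by omega) (by omega) (by omega)
      intro j _ _
      by_contra h
      have hj := (hpj j).mp (by simpa using h)
      have hr : (s.rotate j).length = n := by simp [hn]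
      rw [hj] at hr
      omega
    rw [hscan]
  · rw [if_neg hshort]
    have hlen : (t.take n).length = n := by
      have := List.length_take_le n t
      omega
    set tgt := t.take n with htg
    set i := PySem.Chars.find (s ++ s) tgt with hi
    have hlenS : tgt.length = s.length := hlen.trans hn
    by_cases hneg : i = -1
    · -- not found: no rotation matches
      have hninf : ¬ tgt <:+: (s ++ s) := (PySem.Chars.find_eq_neg_one_iff _ _).mp hneg
      have hnoj : ∀ j, ¬ tgt <+: (s ++ s).drop j := by
        intro j hpre
        apply hninf
        rw [← PySem.Chars.isIn_iff_infix]
        exact (PySem.Chars.exists_prefix_drop_iff_isIn tgt (s ++ s)).mp ⟨j, hpre⟩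
      have hscan : pvScanIdx p n 0 = n := by
        apply pvScanIdx_eq_of p n 0 n (by omega) (by omega) (by omega)
        intro j hj0 hjn
        by_contra h
        have hrot := (hpj j).mp (by simpa using h)
        exact hnoj j ((pvOcc_iff s tgt j (by omega) hlenS).mpr hrot)
      have hcond : ¬ (0 ≤ i ∧ i < (n : Int)) := by
        rintro ⟨h1, _⟩
        rw [hneg] at h1
        omega
      rw [hscan, if_neg hcond]
    · -- found at i ≥ 0
      have h0i : 0 ≤ i := by
        have := PySem.Chars.neg_one_le_find (s ++ s) tgt
        omega
      obtain ⟨hpre, hmin⟩ := PySem.Chars.find_spec h0i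
      rw [← hi] at hpre hmin
      have hile : i ≤ ((s ++ s).length : Int) := PySem.Chars.find_le_length (s ++ s) tgt
      have hlen2 : (s ++ s).length = n + n := by simp [hn]
      -- prefix length bound forces i.toNat ≤ n
      have hiton : i.toNat ≤ n := by
        have hl := hpre.length_le
        have : ((s ++ s).drop i.toNat).length = n + n - i.toNat := by
          simp [hlen2]
        omega
      by_cases hn0 : n = 0
      · -- n = 0: both sides are 0
        have hcond : ¬ (0 ≤ i ∧ i < (n : Int)) := by
          rw [hn0]; push_cast; omega
        rw [if_neg hcond, hn0]
        simp [pvScanIdx]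
      · have hlt : i.toNat < n := by
          rcases Nat.lt_or_ge i.toNat n with h | h
          · exact h
          · exfalso
            have hieq : i.toNat = n := by omega
            have hrot := (pvOcc_iff s tgt i.toNat (by omega) hlenS).mp hpre
            rw [hieq, List.rotate_length] at hrot
            have : tgt <+: (s ++ s).drop 0 := by
              simp [← hrot]
            exact absurd this (hmin 0 (by omega))
        have hscan : pvScanIdx p n 0 = i.toNat := by
          apply pvScanIdx_eq_of p n 0 i.toNat (by omega) (by omega)
          · intro _
            exact (hpj i.toNat).mpr ((pvOcc_iff s tgt i.toNat (by omega) hlenS).mp hpre)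
          · intro j _ hji
            by_contra h
            have hrot := (hpj j).mp (by simpa using h)
            exact hmin j hji ((pvOcc_iff s tgt j (by omega) hlenS).mpr hrot)
        have hcond : 0 ≤ i ∧ i < (n : Int) := ⟨h0i, by omega⟩
        rw [hscan, if_pos hcond]
        omega

-- ===== VERDICT (by name: the statement is the Claim_ definition above) =====
theorem compute_repeat_unit_offset_spec : Claim_equal_compute_repeat_unit_offset := by
  intro ru ar _
  unfold Spec_compute_repeat_unit_offset compute_repeat_unit_offset compute_repeat_unit_offset_alt
  exact pvMain ru.toList (PySem.Str.replace ar "-" "").toList
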